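-- pv_equiv track=rewrite | github.com/RMalsonR/Crypt | Permutation Ciphers/route_shuffle_code.py | create_table_decrypt
-- ===== SOURCE A (Python) =====
-- def create_table_decrypt(n, m, word):
--     table = [['_' for i in range(m)] for i in range(n)]
--     count = 0
--     for j in range(len(table[0])):
--         for idx, val in enumerate(table):
--             if count == len(word):
--                 break
--             table[idx][j] = word[count]
--             count = count + 1
--     return table
-- ===== SOURCE B (Python) =====
-- def create_table_decrypt(n, m, word):
--     # closed-form: cell (r, c) holds word[c*n + r] when that index exists, else '_'
--     return [['_' if c * n + r >= len(word) else word[c * n + r] for c in range(m)]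
--             for r in range(n)]
-- ===== Notes on version B (the rewrite author's own statement) =====
-- stated objective: simpler
-- what changed: Replaces A's in-place mutation of a prebuilt table driven by a cross-loop counter with a break, by a direct nested comprehension computing each cell from the closed-form index c*n+r.
-- crash fix: For n <= 0 A raises IndexError on table[0]; B returns the list of n (i.e. zero) rows, []. — e.g. on create_table_decrypt(0, 2, "ab"): A raises IndexError, B returns []
import Mathlib
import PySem

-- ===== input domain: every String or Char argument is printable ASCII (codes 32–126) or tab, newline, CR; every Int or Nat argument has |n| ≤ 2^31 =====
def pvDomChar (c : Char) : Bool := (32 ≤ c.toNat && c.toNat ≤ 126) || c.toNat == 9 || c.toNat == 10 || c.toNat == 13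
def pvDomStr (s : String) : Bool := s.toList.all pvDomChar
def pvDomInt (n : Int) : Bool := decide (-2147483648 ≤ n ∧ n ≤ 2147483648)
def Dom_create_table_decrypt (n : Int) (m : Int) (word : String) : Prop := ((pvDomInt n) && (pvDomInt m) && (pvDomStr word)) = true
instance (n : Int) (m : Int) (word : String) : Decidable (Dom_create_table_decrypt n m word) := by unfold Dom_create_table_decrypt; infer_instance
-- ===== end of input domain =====

-- B replaces A's counter-driven in-place fill of a prebuilt table by a nested
-- comprehension computing each cell from the closed-form index c*n+r (objective: simpler).

-- ===== PORT A =====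
-- table[idx][j] = word[count]: count < len(word) is guaranteed by the preceding break
-- test, so the .getD defaults are never taken; 'break' is modeled as a per-iteration
-- no-op, which is exact because count no longer changes once count == len(word).
def create_table_decrypt (n : Int) (m : Int) (word : String) : List (List String) :=
  let table : List (List String) :=
    (PySem.List.pyRange 0 n 1).map (fun _ => (PySem.List.pyRange 0 m 1).map (fun _ => "_"))
  let cols : Int := (((PySem.List.pyGet? table 0).getD []).length : Int)
  let res :=
    (PySem.List.pyRange 0 cols 1).foldl
      (fun (st : List (List String) × Int) j =>
        (PySem.List.enumerate st.1).foldl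
          (fun (st2 : List (List String) × Int) p =>
            if st2.2 = PySem.Str.len word then st2
            else
              let ch : String := ((PySem.Str.pyGet? word st2.2).map Char.toString).getD "_"
              (PySem.List.pySetD st2.1 p.1
                 (PySem.List.pySetD (PySem.List.pyGetD st2.1 p.1 []) j ch),
               st2.2 + 1))
          st)
      (table, 0)
  res.1

-- ===== PORT B =====
-- word[c*n+r] is only taken when c*n+r < len(word), so the .getD default is never taken.
def create_table_decrypt_alt (n : Int) (m : Int) (word : String) : List (List String) :=
  (PySem.List.pyRange 0 n 1).map (fun r =>
    (PySem.List.pyRange 0 m 1).map (fun c =>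
      if PySem.Str.len word ≤ c * n + r then "_"
      else ((PySem.Str.pyGet? word (c * n + r)).map Char.toString).getD "_"))

-- ===== PRECONDITION & SPEC =====
-- Pre_ excludes exactly n ≤ 0, where A raises IndexError on table[0].
def Pre_create_table_decrypt (n : Int) (m : Int) (word : String) : Prop := 1 ≤ n
instance (n : Int) (m : Int) (word : String) : Decidable (Pre_create_table_decrypt n m word) := by unfold Pre_create_table_decrypt; infer_instance
def pvWitness_create_table_decrypt : Int × Int × String := (2, 3, "hello")

-- For n ≤ 0 A raises IndexError (table is empty, table[0] fails); B returns [].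
def Raises_create_table_decrypt (n : Int) (m : Int) (word : String) : Prop := n ≤ 0
instance (n : Int) (m : Int) (word : String) : Decidable (Raises_create_table_decrypt n m word) := by unfold Raises_create_table_decrypt; infer_instance
def pvRaiseWitness_create_table_decrypt : Int × Int × String := (0, 2, "ab")
def pvRaiseWitnessOut_create_table_decrypt : List (List String) := []

def Spec_create_table_decrypt (n : Int) (m : Int) (word : String) (out : List (List String)) : Prop := out = create_table_decrypt_alt n m word
instance (n : Int) (m : Int) (word : String) (out : List (List String)) : Decidable (Spec_create_table_decrypt n m word out) := by unfold Spec_create_table_decrypt; infer_instance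

-- ===== CLAIM (what is proved, stated in full; the proofs are below) =====
def Claim_equal_create_table_decrypt : Prop := ∀ (n : Int) (m : Int) (word : String), Dom_create_table_decrypt n m word → Pre_create_table_decrypt n m word → Spec_create_table_decrypt n m word (create_table_decrypt n m word)
def Claim_raises_create_table_decrypt : Prop := (∀ (n : Int) (m : Int) (word : String), Dom_create_table_decrypt n m word → Raises_create_table_decrypt n m word → ¬ Pre_create_table_decrypt n m word) ∧ (Dom_create_table_decrypt (pvRaiseWitness_create_table_decrypt.1) (pvRaiseWitness_create_table_decrypt.2.1) (pvRaiseWitness_create_table_decrypt.2.2) ∧ Raises_create_table_decrypt (pvRaiseWitness_create_table_decrypt.1) (pvRaiseWitness_create_table_decrypt.2.1) (pvRaiseWitness_create_table_decrypt.2.2) ∧ create_table_decrypt_alt (pvRaiseWitness_create_table_decrypt.1) (pvRaiseWitness_create_table_decrypt.2.1) (pvRaiseWitness_create_table_decrypt.2.2) = pvRaiseWitnessOut_create_table_decrypt)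

-- ===== LEMMAS AND PROOFS =====

def pvChr (W : List Char) (i : Nat) : String := ((W[i]?).map Char.toString).getD "_"

def pvCell (W : List Char) (N j i r c : Nat) : String :=
  if (c < j ∨ (c = j ∧ r < i)) ∧ c * N + r < W.length then pvChr W (c * N + r) else "_"

def pvTab (W : List Char) (N M j i : Nat) : List (List String) :=
  (List.range N).map (fun r => (List.range M).map (fun c => pvCell W N j i r c))

def pvCnt (W : List Char) (N j i : Nat) : Int := ((min (j * N + i) W.length : Nat) : Int)

theorem pv_foldl_range_inv {α : Type} (g : α → Nat → α) (P : Nat → α) (K : Nat)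
    (h : ∀ j, j < K → g (P j) j = P (j+1)) : (List.range K).foldl g (P 0) = P K := by
  induction K with
  | zero => simp
  | succ k ih =>
      rw [List.range_succ, List.foldl_append, ih (fun j hj => h j (by omega))]
      simpa using h k (by omega)

theorem pv_set_map_range {α : Type} (f : Nat → α) (N i : Nat) (v : α) :
    ((List.range N).map f).set i v = (List.range N).map (fun r => if r = i then v else f r) := by
  apply List.ext_getElem
  · simp
  · intro k hk1 hk2
    simp only [List.length_map, List.length_range] at hk1
    by_cases hki : k = i <;>
      simp [List.getElem_set, hki] <;> omega

theorem pv_foldl_pyRange_inv {α : Type} (g : α → Int → α) (K : Nat) (P : Nat → α)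
    (h : ∀ j, j < K → g (P j) (j : Int) = P (j+1)) :
    (PySem.List.pyRange 0 (K : Int) 1).foldl g (P 0) = P K := by
  rw [PySem.List.pyRange_zero_natCast, List.foldl_map]
  exact pv_foldl_range_inv (fun st k => g st (k : Int)) P K h

theorem pv_enum_aux {α β : Type} (g : α → Int × β → α) (xs : List β) (s : Nat) (P : Nat → α)
    (h : ∀ i (hi : i < xs.length), g (P i) (((s + i : Nat) : Int), xs[i]) = P (i+1)) :
    (PySem.List.enumerate xs ((s : Nat) : Int)).foldl g (P 0) = P xs.length := by
  induction xs generalizing s P with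
  | nil => simp [PySem.List.enumerate_nil]
  | cons x xs ih =>
      rw [PySem.List.enumerate_cons, List.foldl_cons]
      have h0 := h 0 (by simp)
      simp only [Nat.add_zero, List.getElem_cons_zero] at h0
      rw [h0]
      have hs : ((s : Nat) : Int) + 1 = (((s+1 : Nat)) : Int) := by push_cast; ring
      rw [hs]
      have := ih (s+1) (fun i => P (i+1))
        (fun i hi => by
          have := h (i+1) (by simpa using Nat.succ_lt_succ hi)
          simpa [Nat.add_comm, Nat.add_assoc, Nat.add_left_comm] using this)
      simpa using this

theorem pv_enum_inv {α β : Type} (g : α → Int × β → α) (xs : List β) (P : Nat → α)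
    (h : ∀ i (hi : i < xs.length), g (P i) (((i : Nat) : Int), xs[i]) = P (i+1)) :
    (PySem.List.enumerate xs).foldl g (P 0) = P xs.length := by
  have := pv_enum_aux g xs 0 P (by simpa using h)
  simpa using this

theorem pvTab_length (W : List Char) (N M j i : Nat) : (pvTab W N M j i).length = N := by
  simp [pvTab]

theorem pv_row_step (word : String) (N M j i : Nat) (hj : j < M) (hi : i < N) :
    (if (pvCnt word.toList N j i) = PySem.Str.len word then
       (pvTab word.toList N M j i, pvCnt word.toList N j i)
     else
       ((PySem.List.pySetD (pvTab word.toList N M j i) ((i : Nat) : Int)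
          (PySem.List.pySetD (PySem.List.pyGetD (pvTab word.toList N M j i) ((i : Nat) : Int) []) ((j : Nat) : Int)
            (((PySem.Str.pyGet? word (pvCnt word.toList N j i)).map Char.toString).getD "_"))),
        pvCnt word.toList N j i + 1))
    = (pvTab word.toList N M j (i+1), pvCnt word.toList N j (i+1)) := by
  have hlen : PySem.Str.len word = (word.toList.length : Int) := PySem.Str.len_eq word
  by_cases hstop : word.toList.length ≤ j * N + i
  · have hcnt : pvCnt word.toList N j i = (word.toList.length : Int) := by
      unfold pvCnt; congr 1; omega
    rw [if_pos (by rw [hcnt, hlen])]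
    refine Prod.ext ?_ ?_
    · show pvTab word.toList N M j i = pvTab word.toList N M j (i+1)
      unfold pvTab
      apply List.map_congr_left; intro r hr
      apply List.map_congr_left; intro c hc
      unfold pvCell
      by_cases hcj : c = j
      · subst hcj
        by_cases hri : r = i
        · subst hri; exact if_congr (by omega) rfl rfl
        · exact if_congr (by omega) rfl rfl
      · exact if_congr (by omega) rfl rfl
    · show pvCnt word.toList N j i = pvCnt word.toList N j (i+1)
      unfold pvCnt; congr 1; omega
  · have hgo : j * N + i < word.toList.length := by omega
    have hcnt : pvCnt word.toList N j i = ((j * N + i : Nat) : Int) := by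
      unfold pvCnt; congr 1; omega
    rw [if_neg (by rw [hcnt, hlen]; exact_mod_cast Nat.ne_of_lt hgo)]
    have hch : (((PySem.Str.pyGet? word (pvCnt word.toList N j i)).map Char.toString).getD "_")
        = pvChr word.toList (j * N + i) := by
      rw [hcnt, PySem.Str.pyGet?_natCast]; rfl
    have hrow : PySem.List.pyGetD (pvTab word.toList N M j i) ((i : Nat) : Int) []
        = (List.range M).map (fun c => pvCell word.toList N j i i c) := by
      rw [PySem.List.pyGetD_natCast]
      simp [pvTab, List.getD_eq_getElem?_getD, hi]
    rw [hch, hrow, PySem.List.pySetD_natCast, PySem.List.pySetD_natCast, pv_set_map_range]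
    refine Prod.ext ?_ ?_
    · show (pvTab word.toList N M j i).set i _ = pvTab word.toList N M j (i+1)
      unfold pvTab
      rw [pv_set_map_range]
      apply List.map_congr_left; intro r hr
      by_cases hri : r = i
      · subst hri
        rw [if_pos rfl]
        apply List.map_congr_left; intro c hc
        by_cases hcj : c = j
        · subst hcj
          rw [if_pos rfl]
          unfold pvCell
          rw [if_pos ⟨Or.inr ⟨rfl, Nat.lt_succ_self _⟩, by omega⟩]
        · rw [if_neg hcj]
          unfold pvCell
          exact if_congr (by omega) rfl rfl
      · rw [if_neg hri]
        apply List.map_congr_left; intro c hc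
        unfold pvCell
        by_cases hcj : c = j
        · subst hcj; exact if_congr (by omega) rfl rfl
        · exact if_congr (by omega) rfl rfl
    · show pvCnt word.toList N j i + 1 = pvCnt word.toList N j (i+1)
      rw [hcnt]; unfold pvCnt; push_cast; omega

theorem pvA_eq (n m : Int) (word : String) (h : 1 ≤ n) :
    create_table_decrypt n m word = pvTab word.toList n.toNat m.toNat m.toNat 0 := by
  obtain ⟨N, hN⟩ : ∃ N : Nat, n = (N : Int) := ⟨n.toNat, (Int.toNat_of_nonneg (by omega)).symm⟩
  subst hN
  have hN1 : 1 ≤ N := by exact_mod_cast h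
  simp only [Int.toNat_natCast]
  unfold create_table_decrypt
  dsimp only []
  have htable : List.map (fun _ => List.map (fun _ => ("_" : String)) (PySem.List.pyRange 0 m))
      (PySem.List.pyRange 0 (N : Int))
      = pvTab word.toList N m.toNat 0 0 := by
    rw [PySem.List.pyRange_zero_natCast, PySem.List.pyRange_one 0 m]
    unfold pvTab
    simp only [List.map_map, Int.sub_zero, Function.comp]
    apply List.map_congr_left; intro r _
    apply List.map_congr_left; intro c _
    unfold pvCell
    rw [if_neg (by omega)]
    rfl
  rw [htable]
  have hget : ((PySem.List.pyGet? (pvTab word.toList N m.toNat 0 0) 0).getD [])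
      = List.map (fun c => pvCell word.toList N 0 0 0 c) (List.range m.toNat) := by
    rw [PySem.List.pyGet?_zero]
    unfold pvTab
    rw [List.getElem?_map]
    rw [show (List.range N)[0]? = some 0 by rw [List.getElem?_range] <;> omega]
    rfl
  rw [hget]
  simp only [List.length_map, List.length_range]
  rw [show ((pvTab word.toList N m.toNat 0 0, (0 : Int)))
      = (pvTab word.toList N m.toNat 0 0, pvCnt word.toList N 0 0) from by simp [pvCnt]]
  refine Eq.trans (congrArg Prod.fst (pv_foldl_pyRange_inv _ m.toNat
      (fun j => (pvTab word.toList N m.toNat j 0, pvCnt word.toList N j 0)) ?_)) rfl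
  intro j hj
  dsimp only []
  refine Eq.trans (pv_enum_inv _ (pvTab word.toList N m.toNat j 0)
      (fun i => (pvTab word.toList N m.toNat j i, pvCnt word.toList N j i)) ?_) ?_
  · intro i hi
    rw [pvTab_length] at hi
    dsimp only []
    exact pv_row_step word N m.toNat j i hj hi
  · rw [pvTab_length]
    refine Prod.ext ?_ ?_
    · show pvTab word.toList N m.toNat j N = pvTab word.toList N m.toNat (j+1) 0
      unfold pvTab
      apply List.map_congr_left; intro r hr
      apply List.map_congr_left; intro c hc
      simp only [List.mem_range] at hr hc
      unfold pvCell
      by_cases hcj : c = j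
      · subst hcj; exact if_congr (by omega) rfl rfl
      · by_cases hcj1 : c = j + 1
        · subst hcj1; exact if_congr (by omega) rfl rfl
        · exact if_congr (by omega) rfl rfl
    · show pvCnt word.toList N j N = pvCnt word.toList N (j+1) 0
      unfold pvCnt
      congr 1
      rw [Nat.add_zero, Nat.succ_mul]

theorem pvB_eq (n m : Int) (word : String) (h : 1 ≤ n) :
    create_table_decrypt_alt n m word = pvTab word.toList n.toNat m.toNat m.toNat 0 := by
  obtain ⟨N, hN⟩ : ∃ N : Nat, n = (N : Int) := ⟨n.toNat, (Int.toNat_of_nonneg (by omega)).symm⟩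
  subst hN
  unfold create_table_decrypt_alt pvTab
  rw [PySem.List.pyRange_zero_natCast, PySem.List.pyRange_one 0 m]
  simp only [Int.sub_zero, List.map_map, Function.comp, zero_add, Int.toNat_natCast]
  apply List.map_congr_left
  intro r hr
  apply List.map_congr_left
  intro c hc
  simp only [List.mem_range] at hr hc
  simp only [Function.comp_apply]
  unfold pvCell pvChr
  rw [PySem.Str.len_eq]
  rw [show ((c:Int)) * (N:Int) + (r:Int) = ((c * N + r : Nat) : Int) by push_cast; ring,
      PySem.Str.pyGet?_natCast]
  by_cases hL : c * N + r < word.toList.length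
  · rw [if_neg (by omega), if_pos (by omega)]
  · rw [if_pos (by omega), if_neg (by omega)]

-- ===== VERDICT (by name: the statement is the Claim_ definition above) =====
theorem create_table_decrypt_spec : Claim_equal_create_table_decrypt := by
  intro n m word _ hpre
  unfold Spec_create_table_decrypt
  rw [pvA_eq n m word hpre, pvB_eq n m word hpre]

@[simp] theorem create_table_decrypt_raises : Claim_raises_create_table_decrypt := by
  unfold Claim_raises_create_table_decrypt
  exact ⟨fun n m w _ h => by unfold Raises_create_table_decrypt at h; unfold Pre_create_table_decrypt; omega, by decide⟩
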